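-- pv_equiv track=rewrite | github.com/imReese/leetcode-solutions | problems/3356-zero-array-transformation-ii/solution.py | check
-- ===== SOURCE A (Python) =====
-- from typing import List
--
-- def check(nums: List[int], queries: List[List[int]], k: int) -> bool:
--     n = len(nums)
--     pre = [0] * (n + 2)
--
--     for i in range(k):
--         l, r, val = queries[i]
--         pre[l] -= val
--         if r + 1 < n:
--             pre[r + 1] += val
--
--     prefix_sum = 0
--     for i in range(n):
--         prefix_sum += pre[i]
--         if nums[i] + prefix_sum > 0:
--             return False
--     return True
-- ===== SOURCE B (Python) =====
-- from typing import List
--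
-- def check(nums: List[int], queries: List[List[int]], k: int) -> bool:
--     # Brute force: for each position, sum the decrements of the first k
--     # queries that cover it; no difference array.
--     for i, x in enumerate(nums):
--         decr = 0
--         for j in range(k):
--             l, r, val = queries[j]
--             if l <= i <= r:
--                 decr += val
--         if x > decr:
--             return False
--     return True
-- ===== Notes on version B (the rewrite author's own statement) =====
-- stated objective: alternative
-- what changed: Replaces the difference-array + prefix-sum sweep by a direct per-index brute force: for each position sum the values of the first k covering queries and compare.
-- outside the precondition, e.g. on check([0, 0, 0], [[2, 0, 1]], 1): A returns False, B returns True; on check([1], [[-1, 0, 1]], 1): A returns False, B returns True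
import Mathlib
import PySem

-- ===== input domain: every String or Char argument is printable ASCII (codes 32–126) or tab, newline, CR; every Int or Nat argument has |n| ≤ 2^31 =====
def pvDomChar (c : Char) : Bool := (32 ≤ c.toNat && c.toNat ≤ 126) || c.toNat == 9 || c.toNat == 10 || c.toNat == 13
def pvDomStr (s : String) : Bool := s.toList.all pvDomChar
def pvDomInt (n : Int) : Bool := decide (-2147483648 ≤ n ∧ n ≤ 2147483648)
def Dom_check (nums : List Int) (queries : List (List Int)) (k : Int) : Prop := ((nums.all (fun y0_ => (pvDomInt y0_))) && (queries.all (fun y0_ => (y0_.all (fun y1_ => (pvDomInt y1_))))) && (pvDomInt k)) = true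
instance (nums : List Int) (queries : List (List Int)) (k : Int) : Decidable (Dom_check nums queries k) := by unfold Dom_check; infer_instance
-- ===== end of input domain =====

-- B replaces A's difference-array + prefix-sum sweep by a direct per-index brute force
-- (sum the first k covering queries for each position); objective: alternative algorithm.

-- ===== PORT A =====
-- one iteration of A's first loop: l, r, val = queries[i]; pre[l] -= val; if r+1 < n: pre[r+1] += val
def preUpd (n : Int) (pre : List Int) (q : List Int) : List Int :=
  match q with
  | [l, r, val] =>
    let pre1 := PySem.List.pySetD pre l (PySem.List.pyGetD pre l 0 - val)
    if r + 1 < n then PySem.List.pySetD pre1 (r + 1) (PySem.List.pyGetD pre1 (r + 1) 0 + val)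
    else pre1
  | _ => pre  -- Python raises on unpacking here; unreachable under Pre_check

def check (nums : List Int) (queries : List (List Int)) (k : Int) : Bool :=
  let n : Int := nums.length
  let pre := (PySem.List.pyRange 0 k 1).foldl
      (fun pre i => preUpd n pre (PySem.List.pyGetD queries i []))
      (List.replicate (nums.length + 2) 0)
  ((PySem.List.pyRange 0 n 1).foldl
      (fun st i => match st with
        | none => none   -- already returned False
        | some s =>
          let s' := s + PySem.List.pyGetD pre i 0
          if PySem.List.pyGetD nums i 0 + s' > 0 then none else some s')
      (some (0 : Int))).isSome

-- ===== PORT B =====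
-- inner-loop body of B: l, r, val = queries[j]; if l <= i <= r: decr += val
def qContrib (i : Int) (q : List Int) (d : Int) : Int :=
  match q with
  | [l, r, v] => if l ≤ i ∧ i ≤ r then d + v else d
  | _ => d  -- Python raises on unpacking here; unreachable under Pre_check

def altGo (queries : List (List Int)) (k : Int) : List (Int × Int) → Bool
  | [] => true
  | (i, x) :: rest =>
      let decr := (PySem.List.pyRange 0 k 1).foldl
        (fun d j => qContrib i (PySem.List.pyGetD queries j []) d) 0
      if x > decr then false else altGo queries k rest

def check_alt (nums : List Int) (queries : List (List Int)) (k : Int) : Bool :=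
  altGo queries k (PySem.List.enumerate nums 0)

-- ===== PRECONDITION & SPEC =====
def wfq (n : Int) (q : List Int) : Bool :=
  match q with
  | [l, r, _] => decide (0 ≤ l ∧ l ≤ r ∧ l ≤ n + 1)
  | _ => false

-- Pre_ restricts to the problem's natural domain: k within bounds and each of the first k
-- queries a well-formed triple [l, r, val] with 0 ≤ l ≤ r (and l small enough not to raise);
-- on malformed queries (l > r, or negative l) A's negative-index wraparound and
-- inverted-range difference-array arithmetic return accidental values B does not mimic.
def Pre_check (nums : List Int) (queries : List (List Int)) (k : Int) : Prop :=
  k ≤ (queries.length : Int) ∧ ∀ q ∈ queries.take k.toNat, wfq (nums.length : Int) q = true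
instance (nums : List Int) (queries : List (List Int)) (k : Int) : Decidable (Pre_check nums queries k) := by unfold Pre_check; infer_instance

def pvWitness_check : List Int × List (List Int) × Int := ([1, 2], [[0, 1, 2]], 1)

def Spec_check (nums : List Int) (queries : List (List Int)) (k : Int) (out : Bool) : Prop := out = check_alt nums queries k
instance (nums : List Int) (queries : List (List Int)) (k : Int) (out : Bool) : Decidable (Spec_check nums queries k out) := by unfold Spec_check; infer_instance

-- ===== CLAIM (what is proved, stated in full; the proofs are below) =====
def Claim_equal_check : Prop := ∀ (nums : List Int) (queries : List (List Int)) (k : Int), Dom_check nums queries k → Pre_check nums queries k → Spec_check nums queries k (check nums queries k)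


-- ===== spec-side helpers used by the claim proofs (definitions only) =====
def contrib (i : Int) (q : List Int) : Int :=
  match q with
  | [l, r, v] => if l ≤ i ∧ i ≤ r then v else 0
  | _ => 0

def decrSum (queries : List (List Int)) (k : Int) (i : Int) : Int :=
  ((queries.take k.toNat).map (contrib i)).sum

def goD (DD : Int → Int) : List (Int × Int) → Bool
  | [] => true
  | (i, x) :: rest => if x > DD i then false else goD DD rest

-- ===== LEMMAS AND PROOFS =====

-- xs[i] for an in-range Nat index
theorem pyGetD_in {α : Type} (xs : List α) (d : α) (m : Nat) (h : m < xs.length) :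
    PySem.List.pyGetD xs (m : Int) d = xs[m] := by
  simp [PySem.List.pyGetD_natCast, List.getD_eq_getElem?_getD, List.getElem?_eq_getElem h]

-- a `for i in range(k)` loop reading queries[i] is a fold over the first k queries
theorem fold_pyRange_take {α β : Type} (f : β → α → β) (xs : List α) (d : α) :
    ∀ (m : Nat) (init : β), m ≤ xs.length →
      (PySem.List.pyRange 0 (m : Int) 1).foldl (fun acc i => f acc (PySem.List.pyGetD xs i d)) init
        = (xs.take m).foldl f init := by
  intro m
  induction m with
  | zero => intro init h; simp
  | succ m ih =>
      intro init h
      rw [show ((m + 1 : Nat) : Int) = (m : Int) + 1 by push_cast; ring,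
          PySem.List.pyRange_one_succ_right (by positivity)]
      rw [List.foldl_append, ih init (by omega)]
      have htk : xs.take (m + 1) = xs.take m ++ [xs[m]] := by
        rw [List.take_add_one, List.getElem?_eq_getElem (by omega)]
        rfl
      rw [htk, List.foldl_append]
      simp only [List.foldl_cons, List.foldl_nil]
      rw [pyGetD_in xs d m (by omega)]
      rfl

theorem fold_pyRange_take' {β : Type} (f : β → List Int → β) (xs : List (List Int)) (k : Int)
    (init : β) (hk : k ≤ (xs.length : Int)) :
    (PySem.List.pyRange 0 k 1).foldl (fun acc i => f acc (PySem.List.pyGetD xs i [])) init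
      = (xs.take k.toNat).foldl f init := by
  by_cases h0 : 0 ≤ k
  · rw [show k = (k.toNat : Int) by omega]
    exact fold_pyRange_take f xs [] k.toNat init (by omega)
  · rw [PySem.List.pyRange_one_eq_nil (by omega), show k.toNat = 0 by omega]
    simp

theorem sum_set_add (ys : List Int) (j : Nat) (δ : Int) (h : j < ys.length) :
    (ys.set j (ys[j] + δ)).sum = ys.sum + δ := by
  induction ys generalizing j with
  | nil => simp at h
  | cons y ys ih =>
      cases j with
      | zero => simp; ring
      | succ j =>
          simp only [List.set, List.getElem_cons_succ, List.sum_cons, ih j (by simpa using h)]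
          ring

theorem sum_take_set_add (xs : List Int) (j : Nat) (δ : Int) (m : Nat)
    (hj : j < xs.length) :
    ((xs.set j (xs[j] + δ)).take m).sum
      = (xs.take m).sum + (if j < m then δ else 0) := by
  rw [List.take_set]
  by_cases hjm : j < m
  · have hj' : j < (xs.take m).length := by simp; omega
    have he : (xs.take m)[j]'hj' = xs[j] := List.getElem_take
    rw [if_pos hjm, ← he, sum_set_add (xs.take m) j δ hj']
  · rw [if_neg hjm, List.set_eq_of_length_le]
    · ring
    · simp; omega

theorem foldl_qContrib (i : Int) :
    ∀ (qs : List (List Int)) (d : Int),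
      qs.foldl (fun d q => qContrib i q d) d = d + (qs.map (contrib i)).sum := by
  intro qs
  induction qs with
  | nil => intro d; simp
  | cons q qs ih =>
      intro d
      simp only [List.foldl_cons, List.map_cons, List.sum_cons, ih]
      rcases q with _ | ⟨a, _ | ⟨b, _ | ⟨c, _ | ⟨e, t⟩⟩⟩⟩ <;> simp [qContrib, contrib]
      split_ifs <;> ring

-- B's inner loop computes decrSum
theorem dAlt_eq (queries : List (List Int)) (k : Int) (i : Int)
    (hk : k ≤ (queries.length : Int)) :
    (PySem.List.pyRange 0 k 1).foldl
        (fun d j => qContrib i (PySem.List.pyGetD queries j []) d) 0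
      = decrSum queries k i := by
  rw [fold_pyRange_take' (fun d q => qContrib i q d) queries k 0 hk, decrSum,
      foldl_qContrib i (queries.take k.toNat) 0]
  ring

theorem altGo_eq_goD (queries : List (List Int)) (k : Int)
    (hk : k ≤ (queries.length : Int)) :
    ∀ pairs : List (Int × Int), altGo queries k pairs = goD (decrSum queries k) pairs := by
  intro pairs
  induction pairs with
  | nil => rfl
  | cons p rest ih =>
      obtain ⟨i, x⟩ := p
      simp only [altGo, goD, dAlt_eq queries k i hk, ih]

theorem length_preUpd (n : Int) (pre : List Int) (q : List Int) :
    (preUpd n pre q).length = pre.length := by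
  unfold preUpd
  rcases q with _ | ⟨a, _ | ⟨b, _ | ⟨c, _ | ⟨e, t⟩⟩⟩⟩ <;> simp
  split_ifs <;> simp [PySem.List.length_pySetD]

-- effect of one well-formed query on a prefix sum of the difference array
theorem psum_preUpd (nn : Nat) (pre : List Int) (q : List Int) (i : Nat)
    (hlen : pre.length = nn + 2) (hwf : wfq (nn : Int) q = true) (hi : i < nn) :
    ((preUpd (nn : Int) pre q).take (i + 1)).sum
      = (pre.take (i + 1)).sum - contrib (i : Int) q := by
  rcases q with _ | ⟨l, _ | ⟨r, _ | ⟨v, _ | ⟨e, t⟩⟩⟩⟩ <;> simp [wfq] at hwf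
  obtain ⟨hl0, hlr, hln⟩ := hwf
  have hlt : l.toNat < pre.length := by omega
  have hset1 : PySem.List.pySetD pre l (PySem.List.pyGetD pre l 0 - v)
      = pre.set l.toNat (pre[l.toNat] + (-v)) := by
    rw [PySem.List.pySetD_of_nonneg pre _ hl0,
        PySem.List.pyGetD_eq_getElem pre 0 hl0 (by omega)]
    ring_nf
  unfold preUpd
  simp only [hset1]
  by_cases hr : r + 1 < (nn : Int)
  · have hr0 : (0:Int) ≤ r + 1 := by omega
    have hrt : (r+1).toNat < (pre.set l.toNat (pre[l.toNat] + (-v))).length := by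
      simp; omega
    rw [if_pos hr, PySem.List.pySetD_of_nonneg _ _ hr0,
        PySem.List.pyGetD_eq_getElem _ 0 hr0 (by simp; omega),
        sum_take_set_add _ _ v _ hrt, sum_take_set_add pre l.toNat (-v) (i+1) hlt]
    have h1 : l.toNat < i + 1 ↔ l ≤ (i : Int) := by omega
    have h2 : (r+1).toNat < i + 1 ↔ r < (i : Int) := by omega
    simp only [contrib]
    split_ifs with c1 c2 c3 c4 c5 c6 c7 <;> omega
  · rw [if_neg hr, sum_take_set_add pre l.toNat (-v) (i+1) hlt]
    have h1 : l.toNat < i + 1 ↔ l ≤ (i : Int) := by omega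
    simp only [contrib]
    split_ifs with c1 c2 c3 <;> omega

theorem psum_fold (nn : Nat) :
    ∀ (qs : List (List Int)) (pre0 : List Int), pre0.length = nn + 2 →
      (∀ q ∈ qs, wfq (nn : Int) q = true) →
      (qs.foldl (preUpd (nn : Int)) pre0).length = nn + 2 ∧
      ∀ i : Nat, i < nn →
        ((qs.foldl (preUpd (nn : Int)) pre0).take (i + 1)).sum
          = (pre0.take (i + 1)).sum - (qs.map (contrib (i : Int))).sum := by
  intro qs
  induction qs with
  | nil => intro pre0 hlen _; exact ⟨hlen, by simp⟩
  | cons q qs ih =>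
      intro pre0 hlen hwf
      have hlen1 : (preUpd (nn : Int) pre0 q).length = nn + 2 := by
        rw [length_preUpd]; exact hlen
      obtain ⟨hL, hS⟩ := ih (preUpd (nn : Int) pre0 q) hlen1
        (fun q hq => hwf q (List.mem_cons_of_mem _ hq))
      refine ⟨by simpa using hL, fun i hi => ?_⟩
      simp only [List.foldl_cons, List.map_cons, List.sum_cons]
      rw [hS i hi, psum_preUpd nn pre0 q i hlen (hwf q List.mem_cons_self) hi]
      ring

theorem foldl_none {α β : Type} (f : Option β → α → Option β)
    (hf : ∀ a, f none a = none) : ∀ l : List α, l.foldl f none = none := by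
  intro l
  induction l with
  | nil => rfl
  | cons x l ih => rw [List.foldl_cons, hf x]; exact ih

-- A's second loop (early-returning prefix-sum scan) agrees with goD
theorem loopA (nums preF : List Int) (DD : Int → Int)
    (hlen : preF.length = nums.length + 2)
    (hq : ∀ a : Nat, a < nums.length → (preF.take (a + 1)).sum = - DD (a : Int)) :
    ∀ (rest : List Int) (a : Nat), rest = nums.drop a → a ≤ nums.length →
    ((PySem.List.pyRange (a : Int) ((nums.length : Int)) 1).foldl
       (fun st i => match st with
         | none => none
         | some s =>
           let s' := s + PySem.List.pyGetD preF i 0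
           if PySem.List.pyGetD nums i 0 + s' > 0 then none else some s')
       (some ((preF.take a).sum))).isSome
      = goD DD (PySem.List.enumerate rest (a : Int)) := by
  intro rest
  induction rest with
  | nil =>
      intro a hdrop ha
      have : nums.length ≤ a := by
        by_contra hlt
        have := congrArg List.length hdrop
        simp at this; omega
      rw [PySem.List.pyRange_one_eq_nil (by exact_mod_cast this)]
      rfl
  | cons x rest ih =>
      intro a hdrop ha
      have halt : a < nums.length := by
        by_contra hge
        rw [List.drop_eq_nil_of_le (by omega)] at hdrop
        exact (List.cons_ne_nil x rest) hdrop
      have hdr : nums.drop a = nums[a] :: nums.drop (a + 1) :=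
        List.drop_eq_getElem_cons halt
      rw [hdr] at hdrop
      obtain ⟨hx, hrest⟩ : x = nums[a] ∧ rest = nums.drop (a + 1) := by
        injection hdrop with h1 h2; exact ⟨h1, h2⟩
      rw [PySem.List.pyRange_one_cons (by exact_mod_cast halt), List.foldl_cons]
      have hsum : (preF.take a).sum + PySem.List.pyGetD preF (a : Int) 0
          = (preF.take (a + 1)).sum := by
        rw [pyGetD_in preF 0 a (by omega), List.sum_take_succ preF a (by omega)]
      simp only [PySem.List.enumerate_cons, goD, hsum,
        pyGetD_in nums 0 a halt, hq a halt, hx]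
      by_cases hc : nums[a] > DD (a : Int)
      · rw [if_pos (by omega), if_pos hc,
            foldl_none _ (fun i => rfl)]
        rfl
      · rw [if_neg (by omega), if_neg hc,
           show ((a : Int) + 1) = ((a + 1 : Nat) : Int) by push_cast; ring,
           ← hq a halt]
        exact ih (a + 1) hrest (by omega)

theorem A_char (nums : List Int) (queries : List (List Int)) (k : Int)
    (hk : k ≤ (queries.length : Int))
    (hwf : ∀ q ∈ queries.take k.toNat, wfq (nums.length : Int) q = true) :
    check nums queries k = goD (decrSum queries k) (PySem.List.enumerate nums 0) := by
  unfold check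
  dsimp only
  rw [fold_pyRange_take' (preUpd (nums.length : Int)) queries k _ hk]
  obtain ⟨hL, hS⟩ := psum_fold nums.length (queries.take k.toNat)
    (List.replicate (nums.length + 2) 0) (by simp) hwf
  have := loopA nums
    ((queries.take k.toNat).foldl (preUpd ((nums.length : Nat) : Int))
      (List.replicate (nums.length + 2) 0))
    (decrSum queries k) hL
    (fun a ha => by
      rw [hS a ha]
      simp [decrSum, List.take_replicate]) nums 0 (by simp) (by omega)
  simpa using this

theorem B_char (nums : List Int) (queries : List (List Int)) (k : Int)
    (hk : k ≤ (queries.length : Int)) :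
    check_alt nums queries k = goD (decrSum queries k) (PySem.List.enumerate nums 0) := by
  unfold check_alt
  exact altGo_eq_goD queries k hk _

-- ===== VERDICT (by name: the statement is the Claim_ definition above) =====
theorem check_spec : Claim_equal_check := by
  intro nums queries k _hdom hpre
  obtain ⟨hk, hwf⟩ := hpre
  unfold Spec_check
  rw [A_char nums queries k hk hwf, B_char nums queries k hk]
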